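-- pv_equiv track=rewrite | github.com/al3-cruz/Proyecto-programacion | modulo_busqueda.py | buscar_recursiva_auxiliar
-- ===== SOURCE A (Python) =====
-- def buscar_recursiva_auxiliar(contrasenas, termino, indice=0, resultados=None):
--     """Función recursiva auxiliar para búsqueda"""
--     if resultados is None:
--         resultados = []
--
--     # Caso base: terminamos de revisar todas las contraseñas
--     if indice >= len(contrasenas):
--         return resultados
--
--     registro = contrasenas[indice]
--
--     # Verificar coincidencia parcial en servicio o usuario
--     if (termino in registro['servicio'].lower() or
--         termino in registro['usuario'].lower()):
--         resultados.append(registro)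
--
--     # Llamada recursiva para el siguiente registro
--     return buscar_recursiva_auxiliar(contrasenas, termino, indice + 1, resultados)
-- ===== SOURCE B (Python) =====
-- def buscar_recursiva_auxiliar(contrasenas, termino, indice=0, resultados=None):
--     """Staged version: materialize the pending records, filter them, then extend."""
--     def coincide(registro):
--         return (termino in registro['servicio'].lower()
--                 or termino in registro['usuario'].lower())
--
--     pendientes = [contrasenas[i] for i in range(indice, len(contrasenas))]
--     coincidencias = list(filter(coincide, pendientes))
--     if resultados is None:
--         return coincidencias
--     resultados.extend(coincidencias)
--     return resultados
-- ===== Notes on version B (the rewrite author's own statement) =====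
-- stated objective: alternative
-- what changed: Replaces the tail recursion threading a growing accumulator through call frames by three staged passes: materialize the pending suffix of records, filter it with the match predicate, then extend the caller-supplied resultados (or return the filtered list directly).
import Mathlib
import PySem

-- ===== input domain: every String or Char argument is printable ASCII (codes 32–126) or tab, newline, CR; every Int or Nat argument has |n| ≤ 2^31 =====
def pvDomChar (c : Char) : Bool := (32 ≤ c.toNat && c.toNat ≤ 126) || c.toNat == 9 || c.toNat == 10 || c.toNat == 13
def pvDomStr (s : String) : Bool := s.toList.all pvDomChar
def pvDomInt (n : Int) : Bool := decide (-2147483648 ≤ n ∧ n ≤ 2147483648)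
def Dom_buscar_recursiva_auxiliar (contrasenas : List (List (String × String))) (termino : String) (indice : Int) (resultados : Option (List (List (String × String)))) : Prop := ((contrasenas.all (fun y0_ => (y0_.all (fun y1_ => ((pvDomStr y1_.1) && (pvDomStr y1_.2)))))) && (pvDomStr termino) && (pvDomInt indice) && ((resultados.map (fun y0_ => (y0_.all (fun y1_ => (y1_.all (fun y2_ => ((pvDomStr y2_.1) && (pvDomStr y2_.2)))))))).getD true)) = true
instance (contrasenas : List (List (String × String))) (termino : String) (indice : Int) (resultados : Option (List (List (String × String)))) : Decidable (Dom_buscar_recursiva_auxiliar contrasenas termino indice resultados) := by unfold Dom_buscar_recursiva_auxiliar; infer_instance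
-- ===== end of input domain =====

-- B replaces A's accumulator-threading tail recursion by three staged passes (materialize the
-- pending suffix, filter it, extend); same return value. Both Pythons append to a
-- caller-supplied 'resultados' list in place; the ports model the return value only.

-- ===== PORT A =====
-- A's match test 'termino in registro['servicio'].lower() or termino in registro['usuario'].lower()'
-- (a missing key raises KeyError in Python; defaulted to "" here, excluded by Pre_)
def pvMatch (termino : String) (registro : List (String × String)) : Bool :=
  PySem.Str.isIn termino (PySem.Str.lower (PySem.Dict.getD (PySem.Dict.mk registro) "servicio" "")) ||
  PySem.Str.isIn termino (PySem.Str.lower (PySem.Dict.getD (PySem.Dict.mk registro) "usuario" ""))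

def buscar_recursiva_auxiliar (contrasenas : List (List (String × String))) (termino : String) (indice : Int) (resultados : Option (List (List (String × String)))) : List (List (String × String)) :=
  let res := resultados.getD []
  if _h : ((contrasenas.length : Int)) ≤ indice then res
  else
    -- contrasenas[indice]; out-of-range (IndexError) excluded by Pre_, defaulted to []
    let registro := (PySem.List.pyGet? contrasenas indice).getD []
    let res' := if pvMatch termino registro then res ++ [registro] else res
    buscar_recursiva_auxiliar contrasenas termino (indice + 1) (some res')
termination_by ((contrasenas.length : Int) - indice).toNat
decreasing_by omega

-- ===== PORT B =====
-- B's predicate 'any(termino in registro[k].lower() for k in ('servicio','usuario'))'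
def coincide (termino : String) (registro : List (String × String)) : Bool :=
  ["servicio", "usuario"].any fun k =>
    PySem.Str.isIn termino (PySem.Str.lower (PySem.Dict.getD (PySem.Dict.mk registro) k ""))

def buscar_recursiva_auxiliar_alt (contrasenas : List (List (String × String))) (termino : String) (indice : Int) (resultados : Option (List (List (String × String)))) : List (List (String × String)) :=
  let pendientes := (PySem.List.pyRange indice (contrasenas.length : Int) 1).map
    (fun i => (PySem.List.pyGet? contrasenas i).getD [])
  let coincidencias := pendientes.filter (coincide termino)
  match resultados with
  | none => coincidencias
  | some res => res ++ coincidencias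

-- ===== PRECONDITION & SPEC =====
-- Pre_ excludes exactly the inputs where Python A raises: an out-of-range start index
-- (IndexError) or a visited record missing the 'servicio' or 'usuario' key (KeyError).
def pvRecOk (r : List (String × String)) : Bool :=
  (PySem.Dict.get? (PySem.Dict.mk r) "servicio").isSome && (PySem.Dict.get? (PySem.Dict.mk r) "usuario").isSome

def Pre_buscar_recursiva_auxiliar (contrasenas : List (List (String × String))) (termino : String) (indice : Int) (resultados : Option (List (List (String × String)))) : Prop :=
  (contrasenas.length : Int) ≤ indice ∨
  (-(contrasenas.length : Int) ≤ indice ∧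
    ∀ r ∈ contrasenas.drop indice.toNat, pvRecOk r = true)
instance (contrasenas : List (List (String × String))) (termino : String) (indice : Int) (resultados : Option (List (List (String × String)))) : Decidable (Pre_buscar_recursiva_auxiliar contrasenas termino indice resultados) := by unfold Pre_buscar_recursiva_auxiliar; infer_instance

def pvWitness_buscar_recursiva_auxiliar : (List (List (String × String))) × String × Int × (Option (List (List (String × String)))) :=
  ([[("servicio", "Gmail"), ("usuario", "ana")]], "mail", 0, none)

def Spec_buscar_recursiva_auxiliar (contrasenas : List (List (String × String))) (termino : String) (indice : Int) (resultados : Option (List (List (String × String)))) (out : List (List (String × String))) : Prop := out = buscar_recursiva_auxiliar_alt contrasenas termino indice resultados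
instance (contrasenas : List (List (String × String))) (termino : String) (indice : Int) (resultados : Option (List (List (String × String)))) (out : List (List (String × String))) : Decidable (Spec_buscar_recursiva_auxiliar contrasenas termino indice resultados out) := by unfold Spec_buscar_recursiva_auxiliar; infer_instance

-- ===== CLAIM =====
def Claim_equal_buscar_recursiva_auxiliar : Prop := ∀ (contrasenas : List (List (String × String))) (termino : String) (indice : Int) (resultados : Option (List (List (String × String)))), Dom_buscar_recursiva_auxiliar contrasenas termino indice resultados → Pre_buscar_recursiva_auxiliar contrasenas termino indice resultados → Spec_buscar_recursiva_auxiliar contrasenas termino indice resultados (buscar_recursiva_auxiliar contrasenas termino indice resultados)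

-- ===== LEMMAS AND PROOFS =====

theorem coincide_eq (t : String) (r : List (String × String)) : coincide t r = pvMatch t r := by
  simp [coincide, pvMatch, List.any]

-- B's filtered suffix, named for the induction
def pvF (c : List (List (String × String))) (t : String) (i : Int) : List (List (String × String)) :=
  ((PySem.List.pyRange i (c.length : Int) 1).map (fun j => (PySem.List.pyGet? c j).getD [])).filter (coincide t)

-- A equals 'initial results ++ filtered suffix' for every input
theorem pv_key (c : List (List (String × String))) (t : String) (i : Int) (r : Option (List (List (String × String)))) :
    buscar_recursiva_auxiliar c t i r = r.getD [] ++ pvF c t i := by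
  generalize hn : ((c.length : Int) - i).toNat = n
  induction n generalizing i r with
  | zero =>
    have h : (c.length : Int) ≤ i := by omega
    rw [buscar_recursiva_auxiliar]
    simp [h, pvF, PySem.List.pyRange_one_eq_nil h]
  | succ n ih =>
    have h : ¬ ((c.length : Int) ≤ i) := by omega
    rw [buscar_recursiva_auxiliar]
    simp only [h, dite_false]
    rw [ih (i + 1) _ (by omega)]
    simp only [Option.getD_some, pvF,
      PySem.List.pyRange_one_cons (by omega : i < (c.length : Int)),
      List.map_cons, List.filter_cons, coincide_eq]
    by_cases hm : pvMatch t ((PySem.List.pyGet? c i).getD []) = true <;>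
      simp [hm, List.append_assoc]

theorem pv_alt_eq (c : List (List (String × String))) (t : String) (i : Int) (r : Option (List (List (String × String)))) :
    buscar_recursiva_auxiliar_alt c t i r = r.getD [] ++ pvF c t i := by
  cases r <;> simp [buscar_recursiva_auxiliar_alt, pvF]

-- ===== VERDICT =====
theorem buscar_recursiva_auxiliar_spec : Claim_equal_buscar_recursiva_auxiliar := by
  intro c t i r _ _
  unfold Spec_buscar_recursiva_auxiliar
  rw [pv_key, pv_alt_eq]
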